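-- pv_equiv track=rewrite | github.com/c788630/Numclass | numclass.py | dedupe_with_details
-- ===== SOURCE A (Python) =====
-- def dedupe_with_details(classes):
--     """
--     For each label, if multiple are present, keep the one with details (if available).
--     Preserves input order for first occurrence of each label.
--     """
--     label_to_item = {}
--     for item in classes:
--         label = item['label']
--         # prefer details, or first occurrence
--         if label not in label_to_item or (item['details'] and not label_to_item[label]['details']):
--             label_to_item[label] = item
--     # Preserve the original order for the first occurrence of each label
--     seen = set()
--     deduped = []
--     for item in classes:
--         label = item['label']
--         if label not in seen:
--             deduped.append(label_to_item[label])
--             seen.add(label)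
--     return deduped
-- ===== SOURCE B (Python) =====
-- def dedupe_with_details(classes):
--     """
--     Recursive peel: emit the best item for the head's label, then recurse on the
--     remainder with that label removed.  The best item for a label is picked
--     declaratively: the first item with that label and truthy details, else the
--     first occurrence itself.
--     """
--     def best(lab, first):
--         return next((c for c in classes
--                      if c['label'] == lab and c.get('details')), first)
--
--     def go(rest):
--         if not rest:
--             return []
--         first = rest[0]
--         lab = first['label']
--         return [best(lab, first)] + go([c for c in rest[1:] if c['label'] != lab])
--
--     return go(classes)
-- ===== Notes on version B (the rewrite author's own statement) =====
-- stated objective: alternative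
-- what changed: Replaces A's dict-building pass plus seen-set reconstruction pass by a recursive peel: emit the head label's representative (chosen by a direct first-match scan: first item of that label with truthy details, else the first occurrence) and recurse on the list with that label filtered out.
import Mathlib
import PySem

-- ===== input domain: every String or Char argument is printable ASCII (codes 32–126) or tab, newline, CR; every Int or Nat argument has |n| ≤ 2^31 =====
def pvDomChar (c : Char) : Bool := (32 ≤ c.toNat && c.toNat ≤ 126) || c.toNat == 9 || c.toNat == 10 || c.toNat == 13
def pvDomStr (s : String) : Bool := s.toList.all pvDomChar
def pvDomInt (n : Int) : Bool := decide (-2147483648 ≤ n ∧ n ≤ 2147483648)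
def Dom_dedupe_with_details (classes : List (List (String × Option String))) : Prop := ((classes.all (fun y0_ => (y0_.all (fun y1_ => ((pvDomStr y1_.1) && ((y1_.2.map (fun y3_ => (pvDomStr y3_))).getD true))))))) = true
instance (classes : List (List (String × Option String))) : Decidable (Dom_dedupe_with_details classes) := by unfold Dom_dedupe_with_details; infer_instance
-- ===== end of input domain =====

-- B replaces A's dict-building pass plus seen-set reconstruction pass by a recursive peel with a
-- direct first-match scan per label; a different decomposition of the same task, not faster.

-- shared primitive helpers (Python-exact readings of item[k] / item.get(k) and truthiness of an Optional[str])
-- item[k]: first-match lookup; missing key = Python KeyError, excluded by Pre_ below, the port then uses the default none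
def pvItemGet (item : List (String × Option String)) (k : String) : Option String :=
  ((PySem.Dict.mk item).get? k).getD none

def pvHasKey (item : List (String × Option String)) (k : String) : Bool :=
  (PySem.Dict.mk item).contains k

-- Python truthiness of an Optional[str] value: None and "" are falsy
def pvTruthy : Option String → Bool
  | none => false
  | some s => s != ""

def pvLabel (item : List (String × Option String)) : Option String := pvItemGet item "label"
def pvDet (item : List (String × Option String)) : Bool := pvTruthy (pvItemGet item "details")

-- ===== PORT A =====
-- first loop: label_to_item[label] = item when label unseen, or new details truthy and stored falsy
def pvStepA (d : PySem.Dict (Option String) (List (String × Option String)))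
    (item : List (String × Option String)) : PySem.Dict (Option String) (List (String × Option String)) :=
  if !(d.contains (pvLabel item)) || (pvDet item && !(pvDet (d.getD (pvLabel item) []))) then
    d.insert (pvLabel item) item
  else d

-- second loop: emit label_to_item[label] at each label's first occurrence, tracked by the 'seen' set
def pvStep2 (d : PySem.Dict (Option String) (List (String × Option String)))
    (st : PySem.Set (Option String) × List (List (String × Option String)))
    (item : List (String × Option String)) :
    PySem.Set (Option String) × List (List (String × Option String)) :=
  if PySem.Set.contains st.1 (pvLabel item) then st
  else (PySem.Set.add st.1 (pvLabel item), st.2 ++ [d.getD (pvLabel item) []])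

def dedupe_with_details (classes : List (List (String × Option String))) : List (List (String × Option String)) :=
  let label_to_item := classes.foldl pvStepA PySem.Dict.empty
  (classes.foldl (pvStep2 label_to_item) (PySem.Set.empty, [])).2

-- ===== PORT B =====
-- best(lab, first): first item with that label and truthy details (c.get('details')), else first
def pvBest (classes : List (List (String × Option String))) (lab : Option String)
    (first : List (String × Option String)) : List (String × Option String) :=
  ((classes.filter (fun c => pvLabel c == lab && pvDet c)).head?).getD first

-- go(rest): recursive peel, the recursive call filters the head's label out of the tail
def pvGo (classes : List (List (String × Option String))) :
    List (List (String × Option String)) → List (List (String × Option String))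
  | [] => []
  | first :: tail =>
    pvBest classes (pvLabel first) first ::
      pvGo classes (tail.filter (fun c => !(pvLabel c == pvLabel first)))
termination_by rest => rest.length
decreasing_by
  simp only [List.length_unattach, List.length_cons]
  exact Nat.lt_succ_of_le (le_trans (List.length_filter_le _ _) (by simp))

def dedupe_with_details_alt (classes : List (List (String × Option String))) : List (List (String × Option String)) :=
  pvGo classes classes

-- ===== PRECONDITION & SPEC =====
-- Pre_ = exactly the inputs where A returns (no KeyError): every item has a 'label' key; every
-- repeated-label item has a 'details' key; and a label's first occurrence has a 'details' key
-- whenever some later item with that label has truthy details (only then A reads it).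
def Pre_dedupe_with_details (classes : List (List (String × Option String))) : Prop :=
  (∀ item ∈ classes, pvHasKey item "label" = true) ∧
  (∀ i : Nat, (hi : i < classes.length) → ∀ j : Nat, (hj : j < classes.length) → i < j →
    pvLabel classes[i] = pvLabel classes[j] → pvHasKey classes[j] "details" = true) ∧
  (∀ i : Nat, (hi : i < classes.length) → ∀ j : Nat, (hj : j < classes.length) → i < j →
    pvLabel classes[i] = pvLabel classes[j] →
    (∀ k : Nat, (hk : k < i) → pvLabel classes[k] ≠ pvLabel classes[i]) →
    pvDet classes[j] = true → pvHasKey classes[i] "details" = true)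

instance (classes : List (List (String × Option String))) : Decidable (Pre_dedupe_with_details classes) := by
  unfold Pre_dedupe_with_details; infer_instance

def pvWitness_dedupe_with_details : (List (List (String × Option String))) :=
  [[("label", some "a"), ("details", none)],
   [("label", some "b")],
   [("label", some "a"), ("details", some "x")]]

def Spec_dedupe_with_details (classes : List (List (String × Option String))) (out : List (List (String × Option String))) : Prop := out = dedupe_with_details_alt classes
instance (classes : List (List (String × Option String))) (out : List (List (String × Option String))) : Decidable (Spec_dedupe_with_details classes out) := by unfold Spec_dedupe_with_details; infer_instance

-- ===== CLAIM =====
def Claim_equal_dedupe_with_details : Prop := ∀ (classes : List (List (String × Option String))), Dom_dedupe_with_details classes → Pre_dedupe_with_details classes → Spec_dedupe_with_details classes (dedupe_with_details classes)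

-- ===== LEMMAS AND PROOFS =====

-- what A's dict holds for a label after processing cs: the first item of cs with that label and
-- truthy details, else the first item of cs with that label (none if the label is absent)
def pvBestOf : List (List (String × Option String)) → Option (List (String × Option String))
  | [] => none
  | h :: t => some ((((h :: t).filter pvDet).head?).getD h)

theorem pvDet_of_head_filter {g : List (List (String × Option String))}
    {a : List (String × Option String)} (h : (g.filter pvDet).head? = some a) : pvDet a = true := by
  have : a ∈ g.filter pvDet := by
    cases hg : g.filter pvDet with
    | nil => simp [hg] at h
    | cons x xs => simp [hg] at h; simp [h]
  exact (List.mem_filter.1 this).2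

theorem pvFoldA_get (cs : List (List (String × Option String))) (lab : Option String) :
    (cs.foldl pvStepA PySem.Dict.empty).get? lab
      = pvBestOf (cs.filter (fun c => pvLabel c == lab)) := by
  induction cs using List.reverseRecOn with
  | nil => simp [pvBestOf, PySem.Dict.get?_empty]
  | append_singleton cs x ih =>
    rw [List.foldl_append, List.filter_append]
    simp only [List.foldl_cons, List.foldl_nil, List.filter_cons, List.filter_nil]
    set d := cs.foldl pvStepA PySem.Dict.empty with hd
    by_cases hx : pvLabel x = lab
    · -- x has the label lab
      simp only [hx, beq_self_eq_true, if_true]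
      have hcont : d.contains lab = (d.get? lab).isSome := PySem.Dict.contains_eq_isSome_get? d lab
      unfold pvStepA
      cases hg : cs.filter (fun c => pvLabel c == lab) with
      | nil =>
        have hnone : d.get? lab = none := by rw [ih, hg]; rfl
        have : d.contains (pvLabel x) = false := by rw [hx, hcont, hnone]; rfl
        rw [this]
        simp only [Bool.not_false, Bool.true_or, if_true, hx, PySem.Dict.get?_insert_self]
        cases hdx : pvDet x <;> simp [pvBestOf, List.filter, hdx]
      | cons h t =>
        have hsome : d.get? lab = some (((( h :: t).filter pvDet).head?).getD h) := by
          rw [ih, hg]; rfl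
        set s := ((((h :: t).filter pvDet).head?).getD h) with hs
        have hcontT : d.contains (pvLabel x) = true := by
          rw [hx, hcont, hsome]; rfl
        have hgetD : d.getD (pvLabel x) [] = s := by
          rw [hx, PySem.Dict.getD_eq_get?_getD, hsome]; rfl
        rw [hcontT, hgetD]
        simp only [Bool.not_true, Bool.false_or]
        by_cases hup : pvDet x = true ∧ pvDet s = false
        · -- upgrade: stored has falsy details, new has truthy
          have hfe : (h :: t).filter pvDet = [] := by
            cases hf : (h :: t).filter pvDet with
            | nil => rfl
            | cons a as =>
              have : pvDet a = true := pvDet_of_head_filter (by rw [hf]; rfl)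
              have hsa : s = a := by rw [hs, hf]; rfl
              rw [hsa] at hup; exact absurd this (by simp [hup.2])
          have hcondT : (pvDet x && !pvDet s) = true := by simp [hup.1, hup.2]
          rw [hcondT, if_pos rfl, hx, PySem.Dict.get?_insert_self]
          have hrw : pvBestOf (h :: t ++ [x])
              = some (((List.filter pvDet ((h :: t) ++ [x])).head?).getD h) := rfl
          rw [hrw, List.filter_append, hfe]
          simp [List.filter, hup.1]
        · -- no upgrade
          have hcondF : (pvDet x && !pvDet s) = false := by
            cases hdx : pvDet x
            · rfl
            · cases hds : pvDet s
              · exact absurd ⟨hdx, hds⟩ hup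
              · simp
          rw [hcondF, if_neg Bool.false_ne_true, hsome]
          have hrw : pvBestOf (h :: t ++ [x])
              = some (((List.filter pvDet ((h :: t) ++ [x])).head?).getD h) := rfl
          rw [hrw, List.filter_append]
          congr 1
          rw [hs]
          cases hdx : pvDet x with
          | false => simp [List.filter, hdx]
          | true =>
            -- pvDet x true forces pvDet s true, so the old filter is nonempty with head s
            have hds : pvDet s = true := by
              cases hds : pvDet s
              · exact absurd ⟨hdx, hds⟩ hup
              · rfl
            cases hf : (h :: t).filter pvDet with
            | nil =>
              -- then s = h and pvDet h = false, contradicting pvDet s = true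
              have hsh : s = h := by rw [hs, hf]; rfl
              have : pvDet h = true := hsh ▸ hds
              have hmem : h ∈ (h :: t).filter pvDet := List.mem_filter.2 ⟨List.mem_cons_self, this⟩
              rw [hf] at hmem; exact absurd hmem (List.not_mem_nil)
            | cons a as => simp
    · -- x's label is not lab: dict entry and filter both unchanged
      have hbx : (pvLabel x == lab) = false := by simp [hx]
      simp only [hbx]
      rw [if_neg Bool.false_ne_true, List.append_nil, ← ih]
      unfold pvStepA
      split
      · exact PySem.Dict.get?_insert_of_ne d x (show lab ≠ pvLabel x from fun hh => hx hh.symm)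
      · rfl

-- first-occurrence labels of ls given already-seen labels s (A's seen set grows by appending)
def pvFirstOcc : List (Option String) → List (Option String) → List (Option String)
  | [], _ => []
  | l :: ls, s => if l ∈ s then pvFirstOcc ls s else l :: pvFirstOcc ls (s ++ [l])

theorem pvSecondPass (d : PySem.Dict (Option String) (List (String × Option String)))
    (cs : List (List (String × Option String)))
    (s : PySem.Set (Option String)) (out : List (List (String × Option String))) :
    (cs.foldl (pvStep2 d) (s, out)).2 =
      out ++ (pvFirstOcc (cs.map pvLabel) s).map (fun l => d.getD l []) := by
  induction cs generalizing s out with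
  | nil => simp [pvFirstOcc]
  | cons item rest ih =>
    simp only [List.foldl_cons, List.map_cons, pvFirstOcc]
    by_cases hmem : pvLabel item ∈ s
    · have hc : PySem.Set.contains s (pvLabel item) = true :=
        (PySem.Set.contains_iff s _).2 hmem
      rw [show pvStep2 d (s, out) item = (s, out) by unfold pvStep2; simp only [hc, ite_true]]
      rw [ih, if_pos hmem]
    · have hc : PySem.Set.contains s (pvLabel item) = false := by
        cases h : PySem.Set.contains s (pvLabel item)
        · rfl
        · exact absurd ((PySem.Set.contains_iff s _).1 h) hmem
      rw [show pvStep2 d (s, out) item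
            = (s ++ [pvLabel item], out ++ [d.getD (pvLabel item) []]) by
          unfold pvStep2; simp only [hc, PySem.Set.add_of_not_mem hmem, Bool.false_eq_true, ite_false]]
      rw [ih, if_neg hmem]
      simp

-- seen-set first occurrences = peel-style first occurrences of the filtered list
def pvPeel : List (Option String) → List (Option String)
  | [] => []
  | l :: ls => l :: pvPeel (ls.filter (fun m => !(m == l)))
termination_by ls => ls.length
decreasing_by
  simp only [List.length_unattach, List.length_cons]
  exact Nat.lt_succ_of_le (le_trans (List.length_filter_le _ _) (by simp))

theorem pvFirstOcc_eq_peel (ls : List (Option String)) (s : List (Option String)) :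
    pvFirstOcc ls s = pvPeel (ls.filter (fun l => !(l ∈ s : Bool))) := by
  induction hn : ls.length using Nat.strong_induction_on generalizing ls s with
  | _ n ih =>
    cases ls with
    | nil => simp only [pvFirstOcc, List.filter_nil]; rw [pvPeel]
    | cons l t =>
      rw [List.filter_cons]
      simp only [pvFirstOcc]
      by_cases hmem : l ∈ s
      · rw [if_pos hmem]
        simp only [hmem, decide_true, Bool.not_true, Bool.false_eq_true, if_false]
        exact ih t.length (by simp [← hn]) t s rfl
      · rw [if_neg hmem]
        simp only [hmem, decide_false, Bool.not_false, if_true]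
        rw [pvPeel, ih t.length (by simp [← hn]) t (s ++ [l]) rfl, List.filter_filter]
        congr 2
        exact List.filter_congr fun m _ => by
          by_cases h1 : m ∈ s <;> by_cases h2 : m = l <;> simp [h1, h2]

-- invariant of B's recursion: the head of the not-yet-emitted rest is the first item of classes
-- carrying its label
theorem pvHeadFilter (classes : List (List (String × Option String))) (done : List (Option String))
    (first : List (String × Option String)) (tail : List (List (String × Option String)))
    (hrest : classes.filter (fun c => !(pvLabel c ∈ done : Bool)) = first :: tail) :
    (classes.filter (fun c => pvLabel c == pvLabel first)).head? = some first := by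
  have hfnot : pvLabel first ∉ done := by
    have hfm : first ∈ classes.filter (fun c => !(pvLabel c ∈ done : Bool)) := by
      rw [hrest]; exact List.mem_cons_self
    have := (List.mem_filter.1 hfm).2
    simpa using this
  induction classes with
  | nil => simp at hrest
  | cons c cs ih =>
    rw [List.filter_cons] at hrest
    by_cases hc : pvLabel c ∈ done
    · simp only [hc, decide_true, Bool.not_true, Bool.false_eq_true, if_false] at hrest
      have hne : (pvLabel c == pvLabel first) = false := by
        simp only [beq_eq_false_iff_ne, ne_eq]
        intro h; exact hfnot (h ▸ hc)
      rw [List.filter_cons]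
      simp only [hne, Bool.false_eq_true, if_false]
      exact ih hrest
    · simp only [hc, decide_false, Bool.not_false, if_true] at hrest
      have hcf : c = first := (List.cons_eq_cons.1 hrest).1
      subst hcf
      rw [List.filter_cons]
      simp

-- map pvLabel commutes with filtering a label out
theorem pvMapFilter (t : List (List (String × Option String))) (lab : Option String) :
    (t.filter (fun c => !(pvLabel c == lab))).map pvLabel
      = (t.map pvLabel).filter (fun m => !(m == lab)) := by
  induction t with
  | nil => rfl
  | cons c cs ih =>
    simp only [List.filter_cons, List.map_cons]
    cases h : pvLabel c == lab <;> simp [ih]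

-- main lemma: B's peel over the not-yet-emitted rest equals mapping A's dict value over the
-- peel-style first-occurrence labels of that rest
theorem pvGo_eq (classes : List (List (String × Option String))) (done : List (Option String)) :
    pvGo classes (classes.filter (fun c => !(pvLabel c ∈ done : Bool)))
      = (pvPeel ((classes.filter (fun c => !(pvLabel c ∈ done : Bool))).map pvLabel)).map
          (fun l => (classes.foldl pvStepA PySem.Dict.empty).getD l []) := by
  induction hn : (classes.filter (fun c => !(pvLabel c ∈ done : Bool))).length
      using Nat.strong_induction_on generalizing done with
  | _ n ih =>
    cases hrest : classes.filter (fun c => !(pvLabel c ∈ done : Bool)) with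
    | nil => simp [pvGo, pvPeel]
    | cons first tail =>
      rw [pvGo, List.map_cons, pvPeel, List.map_cons]
      congr 1
      · -- heads: A's dict value for this label = B's best pick
        have hget := pvFoldA_get classes (pvLabel first)
        have hhead := pvHeadFilter classes done first tail hrest
        rw [PySem.Dict.getD_eq_get?_getD, hget]
        cases hg : classes.filter (fun c => pvLabel c == pvLabel first) with
        | nil => rw [hg] at hhead; simp at hhead
        | cons h t =>
          have hh : h = first := by rw [hg] at hhead; simpa using hhead
          rw [← hh]
          rw [← hh] at hg
          have hB : pvBestOf (h :: t) = some (((List.filter pvDet (h :: t)).head?).getD h) := rfl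
          rw [hB, Option.getD_some]
          unfold pvBest
          have hff : classes.filter (fun c => pvLabel c == pvLabel h && pvDet c)
              = (classes.filter (fun c => pvLabel c == pvLabel h)).filter pvDet := by
            rw [List.filter_filter]
            exact List.filter_congr fun c _ => Bool.and_comm _ _
          rw [hff, hg]
      · -- tails: recurse with this label added to done
        have htail : tail.filter (fun c => !(pvLabel c == pvLabel first))
            = classes.filter (fun c => !(pvLabel c ∈ (done ++ [pvLabel first]) : Bool)) := by
          have h1 : classes.filter (fun c => !(pvLabel c ∈ (done ++ [pvLabel first]) : Bool))
              = (classes.filter (fun c => !(pvLabel c ∈ done : Bool))).filter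
                  (fun c => !(pvLabel c == pvLabel first)) := by
            rw [List.filter_filter]
            exact List.filter_congr fun c _ => by
              by_cases h1 : pvLabel c ∈ done <;> by_cases h2 : pvLabel c = pvLabel first <;>
                simp [h1, h2]
          rw [h1, hrest, List.filter_cons]
          simp
        have hlen : (classes.filter (fun c => !(pvLabel c ∈ (done ++ [pvLabel first]) : Bool))).length < n := by
          rw [← htail, ← hn, hrest]
          exact Nat.lt_succ_of_le (List.length_filter_le _ _)
        have := ih _ hlen (done ++ [pvLabel first]) rfl
        rw [htail, this]
        congr 2
        rw [← htail]
        exact pvMapFilter tail (pvLabel first)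

-- ===== VERDICT =====
theorem dedupe_with_details_spec : Claim_equal_dedupe_with_details := by
  intro classes _ _
  unfold Spec_dedupe_with_details dedupe_with_details dedupe_with_details_alt
  rw [pvSecondPass]
  have hid : classes.filter (fun c => !(pvLabel c ∈ ([] : List (Option String)) : Bool)) = classes := by
    simp
  have hgo := pvGo_eq classes []
  rw [hid] at hgo
  rw [hgo]
  rw [pvFirstOcc_eq_peel]
  simp
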